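-- pv_equiv track=rewrite | github.com/davidbmar/transcription-realtime-whisper-cognito-s3-lambda | scripts/524-segment-transcripts-by-topic.py | format_plain_text_with_topics
-- ===== SOURCE A (Python) =====
-- from typing import List, Tuple, Optional, Dict, Any
--
-- def format_plain_text_with_topics(
--     segments: List[str],
--     boundaries: List[int]
-- ) -> str:
--     """
--     Format plain text with paragraph breaks at topic boundaries.
--
--     Inserts double newlines (blank line) at topic boundaries,
--     single newlines otherwise.
--     """
--     result = []
--
--     for i, segment in enumerate(segments):
--         if i in boundaries and i > 0:
--             # Topic boundary - add blank line before
--             result.append('\n\n')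
--         elif i > 0:
--             # Same topic - just add space
--             result.append(' ')
--
--         result.append(segment)
--
--     return ''.join(result)
-- ===== SOURCE B (Python) =====
-- def format_plain_text_with_topics(segments, boundaries):
--     # Build paragraph groups, then join: ' ' within a group, '\n\n' between groups.
--     groups = []
--     current = []
--     for i, segment in enumerate(segments):
--         if current and i in boundaries:
--             groups.append(current)
--             current = []
--         current.append(segment)
--     if current:
--         groups.append(current)
--     return '\n\n'.join(' '.join(g) for g in groups)
-- ===== Notes on version B (the rewrite author's own statement) =====
-- stated objective: alternative
-- what changed: B builds explicit paragraph groups (split at boundaries) and joins groups with ' ' and '\n\n' afterwards, instead of A's inline emission of separator tokens into one flat list.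
import Mathlib
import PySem

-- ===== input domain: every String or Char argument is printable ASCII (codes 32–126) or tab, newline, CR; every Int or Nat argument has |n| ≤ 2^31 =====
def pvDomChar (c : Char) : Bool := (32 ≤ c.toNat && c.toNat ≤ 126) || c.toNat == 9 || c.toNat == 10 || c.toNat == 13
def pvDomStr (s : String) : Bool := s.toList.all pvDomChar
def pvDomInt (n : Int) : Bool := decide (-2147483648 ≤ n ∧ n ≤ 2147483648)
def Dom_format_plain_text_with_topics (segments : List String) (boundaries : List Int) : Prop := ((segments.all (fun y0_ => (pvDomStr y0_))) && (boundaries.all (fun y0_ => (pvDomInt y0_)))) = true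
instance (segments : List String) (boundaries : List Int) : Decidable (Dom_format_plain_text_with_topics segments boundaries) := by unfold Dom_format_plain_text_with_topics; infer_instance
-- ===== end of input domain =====

-- B builds explicit paragraph groups and joins them afterwards instead of emitting
-- separator tokens inline into one flat list (objective: alternative decomposition).

-- ===== PORT A =====
-- one loop iteration of A: maybe append a separator, then append the segment
def pvStepA (boundaries : List Int) (res : List String) (p : Int × String) : List String :=
  let res := if p.1 ∈ boundaries ∧ p.1 > 0 then res ++ ["\n\n"]
             else if p.1 > 0 then res ++ [" "] else res
  res ++ [p.2]

def format_plain_text_with_topics (segments : List String) (boundaries : List Int) : String :=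
  PySem.Str.join "" ((PySem.List.enumerate segments).foldl (pvStepA boundaries) [])

-- ===== PORT B =====
-- one loop iteration of B: close the current group at a boundary, then append the segment
def pvStepB (boundaries : List Int) (st : List (List String) × List String)
    (p : Int × String) : List (List String) × List String :=
  if st.2 ≠ [] ∧ p.1 ∈ boundaries then (st.1 ++ [st.2], [p.2])
  else (st.1, st.2 ++ [p.2])

-- the trailing 'if current: groups.append(current)' of B
def pvFinalize (st : List (List String) × List String) : List (List String) :=
  if st.2 ≠ [] then st.1 ++ [st.2] else st.1

def format_plain_text_with_topics_alt (segments : List String) (boundaries : List Int) : String :=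
  PySem.Str.join "\n\n"
    ((pvFinalize ((PySem.List.enumerate segments).foldl (pvStepB boundaries) ([], []))).map
      (fun g => PySem.Str.join " " g))

-- ===== PRECONDITION & SPEC =====
def Spec_format_plain_text_with_topics (segments : List String) (boundaries : List Int) (out : String) : Prop := out = format_plain_text_with_topics_alt segments boundaries
instance (segments : List String) (boundaries : List Int) (out : String) : Decidable (Spec_format_plain_text_with_topics segments boundaries out) := by unfold Spec_format_plain_text_with_topics; infer_instance

-- ===== CLAIM (what is proved, stated in full; the proofs are below) =====
def Claim_equal_format_plain_text_with_topics : Prop := ∀ (segments : List String) (boundaries : List Int), Dom_format_plain_text_with_topics segments boundaries → Spec_format_plain_text_with_topics segments boundaries (format_plain_text_with_topics segments boundaries)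

-- ===== LEMMAS AND PROOFS =====

-- A's flat token list for the tail of the input (indices ≥ 1): separator then segment
def pvTail (b : List Int) : Int → List String → List String
  | _, [] => []
  | n, s :: t => (if n ∈ b then "\n\n" else " ") :: s :: pvTail b (n + 1) t

-- B's group list for the tail of the input, given the current (nonempty) group
def pvGrp (b : List Int) : Int → List String → List String → List (List String)
  | _, cur, [] => [cur]
  | n, cur, s :: t =>
    if n ∈ b then cur :: pvGrp b (n + 1) [s] t else pvGrp b (n + 1) (cur ++ [s]) t

theorem pvGrp_ne_nil (b : List Int) (l : List String) (n : Int) (cur : List String) :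
    pvGrp b n cur l ≠ [] := by
  induction l generalizing n cur with
  | nil => simp [pvGrp]
  | cons s t ih =>
    simp only [pvGrp]
    split
    · simp
    · exact ih _ _

theorem pv_join_nil_eq_flatten (L : List (List Char)) :
    PySem.Chars.join [] L = L.flatten := by
  induction L with
  | nil => simp [PySem.Chars.join_nil]
  | cons p rest ih =>
    cases rest with
    | nil => simp [PySem.Chars.join_singleton]
    | cons q r =>
      rw [PySem.Chars.join_cons_cons]
      simp [ih]

theorem pv_join_append_singleton (sep : List Char) (xs : List (List Char)) (y : List Char)
    (h : xs ≠ []) :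
    PySem.Chars.join sep (xs ++ [y]) = PySem.Chars.join sep xs ++ sep ++ y := by
  induction xs with
  | nil => exact absurd rfl h
  | cons a rest ih =>
    cases rest with
    | nil => simp [PySem.Chars.join_cons_cons, PySem.Chars.join_singleton]
    | cons a2 r =>
      have h1 : (a :: a2 :: r) ++ [y] = a :: a2 :: (r ++ [y]) := rfl
      have h2 : a2 :: (r ++ [y]) = (a2 :: r) ++ [y] := rfl
      rw [h1, PySem.Chars.join_cons_cons, h2, ih (by simp), PySem.Chars.join_cons_cons]
      simp [List.append_assoc]

theorem pv_foldA (b : List Int) (l : List String) :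
    ∀ (n : Int) (acc : List String), 1 ≤ n →
      (PySem.List.enumerate l n).foldl (pvStepA b) acc = acc ++ pvTail b n l := by
  induction l with
  | nil => intro n acc _; simp [PySem.List.enumerate_nil, pvTail]
  | cons s t ih =>
    intro n acc hn
    rw [PySem.List.enumerate_cons, List.foldl_cons]
    have hpos : n > 0 := hn
    by_cases hb : n ∈ b
    · have : pvStepA b acc (n, s) = acc ++ ["\n\n"] ++ [s] := by
        simp [pvStepA, hb, hpos]
      rw [this, ih (n + 1) _ (by omega), pvTail, if_pos hb]
      simp
    · have : pvStepA b acc (n, s) = acc ++ [" "] ++ [s] := by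
        simp [pvStepA, hb, hpos]
      rw [this, ih (n + 1) _ (by omega), pvTail, if_neg hb]
      simp

theorem pv_foldB (b : List Int) (l : List String) :
    ∀ (n : Int) (gs : List (List String)) (cur : List String), cur ≠ [] →
      (((PySem.List.enumerate l n).foldl (pvStepB b) (gs, cur)).2 ≠ [] ∧
       ((PySem.List.enumerate l n).foldl (pvStepB b) (gs, cur)).1 ++
         [((PySem.List.enumerate l n).foldl (pvStepB b) (gs, cur)).2] =
       gs ++ pvGrp b n cur l) := by
  induction l with
  | nil =>
    intro n gs cur hcur
    simp [PySem.List.enumerate_nil, pvGrp, hcur]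
  | cons s t ih =>
    intro n gs cur hcur
    rw [PySem.List.enumerate_cons, List.foldl_cons]
    by_cases hb : n ∈ b
    · have : pvStepB b (gs, cur) (n, s) = (gs ++ [cur], [s]) := by
        simp [pvStepB, hb, hcur]
      rw [this]
      obtain ⟨h1, h2⟩ := ih (n + 1) (gs ++ [cur]) [s] (by simp)
      refine ⟨h1, ?_⟩
      rw [h2, pvGrp, if_pos hb]
      simp
    · have : pvStepB b (gs, cur) (n, s) = (gs, cur ++ [s]) := by
        simp [pvStepB, hb]
      rw [this]
      obtain ⟨h1, h2⟩ := ih (n + 1) gs (cur ++ [s]) (by simp)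
      refine ⟨h1, ?_⟩
      rw [h2, pvGrp, if_neg hb]

theorem pv_bridge (b : List Int) (l : List String) :
    ∀ (n : Int) (cur : List String), cur ≠ [] →
      PySem.Chars.join ['\n', '\n']
          ((pvGrp b n cur l).map (fun g => PySem.Chars.join [' '] (g.map String.toList)))
        = PySem.Chars.join [' '] (cur.map String.toList) ++
            ((pvTail b n l).map String.toList).flatten := by
  induction l with
  | nil =>
    intro n cur _
    simp [pvGrp, pvTail, PySem.Chars.join_singleton]
  | cons s t ih =>
    intro n cur hcur
    by_cases hb : n ∈ b
    · rw [pvGrp, if_pos hb, List.map_cons]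
      have hne : (pvGrp b (n + 1) [s] t).map
          (fun g => PySem.Chars.join [' '] (g.map String.toList)) ≠ [] := by
        simp [pvGrp_ne_nil]
      obtain ⟨q, r, hqr⟩ := List.exists_cons_of_ne_nil hne
      rw [hqr, PySem.Chars.join_cons_cons, ← hqr, ih (n + 1) [s] (by simp)]
      rw [pvTail, if_pos hb]
      simp [PySem.Chars.join_singleton]
    · rw [pvGrp, if_neg hb, ih (n + 1) (cur ++ [s]) (by simp), List.map_append,
         show List.map String.toList [s] = [String.toList s] from rfl,
         pv_join_append_singleton [' '] _ _ (by simpa using hcur), pvTail, if_neg hb]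
      simp [List.append_assoc]

-- ===== VERDICT (by name: the statement is the Claim_ definition above) =====
theorem format_plain_text_with_topics_spec : Claim_equal_format_plain_text_with_topics := by
  intro segments boundaries _
  unfold Spec_format_plain_text_with_topics
  cases segments with
  | nil => rfl
  | cons s t =>
    unfold format_plain_text_with_topics format_plain_text_with_topics_alt
    rw [PySem.List.enumerate_cons, List.foldl_cons, List.foldl_cons,
        show (0 : Int) + 1 = 1 from rfl]
    have hA0 : pvStepA boundaries [] ((0 : Int), s) = [s] := by
      simp [pvStepA]
    have hB0 : pvStepB boundaries ([], []) ((0 : Int), s) = ([], [s]) := by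
      simp [pvStepB]
    rw [hA0, hB0, pv_foldA boundaries t 1 [s] (by omega)]
    obtain ⟨h1, h2⟩ := pv_foldB boundaries t 1 [] [s] (by simp)
    have hfin : pvFinalize ((PySem.List.enumerate t 1).foldl (pvStepB boundaries) ([], [s]))
        = pvGrp boundaries 1 [s] t := by
      rw [pvFinalize, if_pos h1]
      simp only [List.nil_append] at h2
      exact h2
    rw [hfin]
    simp only [PySem.Str.join]
    congr 1
    have hmap : List.map String.toList
          (List.map (fun g => String.ofList (PySem.Chars.join (" ").toList (List.map String.toList g)))
            (pvGrp boundaries 1 [s] t))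
        = (pvGrp boundaries 1 [s] t).map
            (fun g => PySem.Chars.join [' '] (g.map String.toList)) := by
      rw [List.map_map]
      refine List.map_congr_left (fun g _ => ?_)
      simp [show (" ").toList = [' '] from rfl]
    rw [hmap, show ("\n\n").toList = ['\n', '\n'] from rfl,
        show ("").toList = ([] : List Char) from rfl,
        pv_bridge boundaries t 1 [s] (by simp), pv_join_nil_eq_flatten]
    simp [PySem.Chars.join_singleton]
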